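-- pv_equiv track=rewrite | github.com/andrewlugon/Python-exercicios | questao4.py | calcula_top_ocorrencias_de_queries
-- ===== SOURCE A (Python) =====
-- def calcula_top_ocorrencias_de_queries(texto,queries,k):
--
--     lista = []
--     lista2 = []
--     resultado = []
--
--     for x in queries:
--         counta = texto.count(x)
--         lista.append(str(counta))
--         lista2.append(x)
--
--     for y in range(k):
--         contador = 0
--         remover = 0
--         for x in range(0, len(lista),1):
--             if int(lista[x]) > contador:
--                 contador = int(lista[x])
--                 remover = x
--         resultado.append(lista2[remover])
--         lista.remove(lista[remover])
--         lista2.remove(lista2[remover])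
--
--     return resultado
-- ===== SOURCE B (Python) =====
-- def calcula_top_ocorrencias_de_queries(texto, queries, k):
--     # rank all query indices once by descending count; stable sort keeps
--     # earliest-original-order preference on ties (including zero counts)
--     ranked = sorted(range(len(queries)), key=lambda i: -texto.count(queries[i]))
--     return [queries[ranked[j]] for j in range(k)]
-- ===== Notes on version B (the rewrite author's own statement) =====
-- stated objective: faster
-- what changed: A repeatedly rescans and shrinks the count list (k argmax passes with list.remove); B ranks all query indices once with one stable sort by descending count and reads off the first k.
import Mathlib
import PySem

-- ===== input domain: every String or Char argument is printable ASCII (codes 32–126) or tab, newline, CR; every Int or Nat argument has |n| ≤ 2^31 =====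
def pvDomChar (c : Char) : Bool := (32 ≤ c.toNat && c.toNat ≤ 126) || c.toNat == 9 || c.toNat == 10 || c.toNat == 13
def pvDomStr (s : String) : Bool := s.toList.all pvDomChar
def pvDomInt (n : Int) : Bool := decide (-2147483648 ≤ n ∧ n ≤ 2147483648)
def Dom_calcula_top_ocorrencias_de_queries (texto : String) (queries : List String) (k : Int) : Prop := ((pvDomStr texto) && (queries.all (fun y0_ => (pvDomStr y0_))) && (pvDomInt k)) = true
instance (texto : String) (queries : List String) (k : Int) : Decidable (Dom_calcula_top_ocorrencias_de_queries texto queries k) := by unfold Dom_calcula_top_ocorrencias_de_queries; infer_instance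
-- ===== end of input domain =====

-- B ranks all query indices once with one stable sort by descending count instead of
-- A's k destructive argmax-and-remove passes; same return value on every input where A returns.


-- ===== PORT A =====
-- `str(counta)` / `int(lista[x])` are ported by the hand-written decimal pair
-- pvStrOfCount / pvParse below: exact on everything this program feeds them
-- (str of a nonnegative int, int of such a decimal digit string); they are
-- proved mutually inverse in the proofs section.
def pvDigits (n : Nat) : List Char :=
  if _h : n < 10 then [Nat.digitChar n]
  else pvDigits (n / 10) ++ [Nat.digitChar (n % 10)]
  decreasing_by exact Nat.div_lt_self (by omega) (by omega)

def pvStrOfCount (n : Nat) : String := String.ofList (pvDigits n)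

def pvParse (s : String) : Int :=
  s.toList.foldl (fun a c => a * 10 + ((c.toNat : Int) - 48)) 0

-- the inner `for x in range(0, len(lista), 1)` argmax scan: state (contador, remover)
def pvAScan (lista : List String) : Int × Int :=
  (PySem.List.pyRange 0 (lista.length : Int) 1).foldl
    (fun st x =>
      if pvParse (PySem.List.pyGetD lista x "") > st.1
      then (pvParse (PySem.List.pyGetD lista x ""), x) else st)
    (0, 0)

-- one iteration of `for y in range(k)`: argmax scan, append, remove from both lists
def pvAStep (st : List String × List String × List String) :
    List String × List String × List String :=
  let lista := st.1
  let lista2 := st.2.1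
  let resultado := st.2.2
  let remover := (pvAScan lista).2
  let q := PySem.List.pyGetD lista2 remover ""
  ((PySem.List.remove? lista (PySem.List.pyGetD lista remover "")).getD lista,
   (PySem.List.remove? lista2 q).getD lista2,
   resultado ++ [q])

def calcula_top_ocorrencias_de_queries (texto : String) (queries : List String) (k : Int) : List String :=
  -- first loop: lista.append(str(texto.count(x))); lista2.append(x)
  let init := queries.foldl
    (fun (st : List String × List String) x =>
      (st.1 ++ [pvStrOfCount (PySem.Str.count texto x)], st.2 ++ [x]))
    ([], [])
  let fin := (PySem.List.pyRange 0 k 1).foldl (fun st _ => pvAStep st) (init.1, init.2, [])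
  fin.2.2

-- ===== PORT B =====
def calcula_top_ocorrencias_de_queries_alt (texto : String) (queries : List String) (k : Int) : List String :=
  let ranked := PySem.List.sorted (PySem.List.pyRange 0 (queries.length : Int) 1)
    (fun i => -((PySem.Str.count texto (PySem.List.pyGetD queries i "") : Int))) false
  (PySem.List.pyRange 0 k 1).map
    (fun j => PySem.List.pyGetD queries (PySem.List.pyGetD ranked j 0) "")

-- ===== PRECONDITION & SPEC =====
-- Pre_ excludes exactly the inputs with k > len(queries), on which A raises
-- IndexError (lista2[remover] on an emptied list); B raises IndexError there too.
def Pre_calcula_top_ocorrencias_de_queries (texto : String) (queries : List String) (k : Int) : Prop :=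
  k ≤ (queries.length : Int)
instance (texto : String) (queries : List String) (k : Int) : Decidable (Pre_calcula_top_ocorrencias_de_queries texto queries k) := by unfold Pre_calcula_top_ocorrencias_de_queries; infer_instance

def pvWitness_calcula_top_ocorrencias_de_queries : String × List String × Int :=
  ("ab a b a", ["a", "b", "c"], 2)

def Spec_calcula_top_ocorrencias_de_queries (texto : String) (queries : List String) (k : Int) (out : List String) : Prop := out = calcula_top_ocorrencias_de_queries_alt texto queries k
instance (texto : String) (queries : List String) (k : Int) (out : List String) : Decidable (Spec_calcula_top_ocorrencias_de_queries texto queries k out) := by unfold Spec_calcula_top_ocorrencias_de_queries; infer_instance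

-- ===== CLAIM (what is proved, stated in full; the proofs are below) =====
def Claim_equal_calcula_top_ocorrencias_de_queries : Prop := ∀ (texto : String) (queries : List String) (k : Int), Dom_calcula_top_ocorrencias_de_queries texto queries k → Pre_calcula_top_ocorrencias_de_queries texto queries k → Spec_calcula_top_ocorrencias_de_queries texto queries k (calcula_top_ocorrencias_de_queries texto queries k)

-- ===== LEMMAS AND PROOFS =====

-- ---- the decimal pair is mutually inverse ----
theorem pvDigitChar_toNat (d : Nat) (h : d < 10) : (Nat.digitChar d).toNat = 48 + d := by
  interval_cases d <;> rfl

theorem pvDigits_foldl (n : Nat) (acc : Int) :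
    (pvDigits n).foldl (fun a c => a * 10 + ((c.toNat : Int) - 48)) acc
      = acc * 10 ^ (pvDigits n).length + n := by
  induction n using Nat.strong_induction_on generalizing acc with
  | _ n ih =>
    rw [pvDigits]
    by_cases h : n < 10
    · simp only [h, dif_pos, List.foldl_cons, List.foldl_nil, List.length_cons,
        List.length_nil, pvDigitChar_toNat n h]
      push_cast; ring
    · simp only [h, dif_neg, not_false_iff, List.foldl_append, List.foldl_cons,
        List.foldl_nil, List.length_append, List.length_cons, List.length_nil]
      rw [ih (n / 10) (Nat.div_lt_self (by omega) (by omega)) acc]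
      rw [pvDigitChar_toNat (n % 10) (Nat.mod_lt n (by omega))]
      have hn : ((n / 10 : Nat) : Int) * 10 + ((n % 10 : Nat) : Int) = (n : Int) := by
        push_cast; omega
      have h48 : ((48 + n % 10 : Nat) : Int) = 48 + ((n % 10 : Nat) : Int) := by
        push_cast; ring
      rw [pow_succ, h48]
      linear_combination hn

theorem pvParse_pvStrOfCount (n : Nat) : pvParse (pvStrOfCount n) = (n : Int) := by
  show (String.ofList (pvDigits n)).toList.foldl _ 0 = (n : Int)
  rw [String.toList_ofList, pvDigits_foldl]
  ring

theorem pvStrOfCount_inj {a b : Nat} (h : pvStrOfCount a = pvStrOfCount b) : a = b := by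
  have := pvParse_pvStrOfCount a
  rw [h, pvParse_pvStrOfCount b] at this
  exact_mod_cast this.symm

-- ---- the argmax scan, in structural form ----
def pvScanGo : List Int → Int → Int × Int → Int × Int
  | [], _, st => st
  | a :: t, i, st => pvScanGo t (i + 1) (if a > st.1 then (a, i) else st)

theorem pvGetD_mem (t : List Int) (j : Nat) (hj : j < t.length) : t.getD j 0 ∈ t := by
  rw [List.getD_eq_getElem t 0 hj]; exact List.getElem_mem hj

theorem pvAScan_aux (full : List String) :
    ∀ (t : List String) (a : Nat), full.drop a = t → ∀ st : Int × Int,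
    (PySem.List.pyRange (a : Int) (full.length : Int) 1).foldl
      (fun st x => if pvParse (PySem.List.pyGetD full x "") > st.1
        then (pvParse (PySem.List.pyGetD full x ""), x) else st) st
      = pvScanGo (t.map pvParse) (a : Int) st := by
  intro t
  induction t generalizing full with
  | nil =>
    intro a hdrop st
    have hlen : full.length ≤ a := by
      by_contra hc
      have := List.drop_eq_nil_iff.mp hdrop
      omega
    rw [PySem.List.pyRange_one_eq_nil (by exact_mod_cast hlen)]
    rfl
  | cons s t' ih =>
    intro a hdrop st
    have ha : a < full.length := by
      by_contra hc
      rw [List.drop_eq_nil_iff.mpr (by omega)] at hdrop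
      cases hdrop
    have hs : full.drop a = full[a] :: full.drop (a + 1) := List.drop_eq_getElem_cons ha
    rw [hs] at hdrop
    injection hdrop with h1 h2
    have hget : PySem.List.pyGetD full (a : Int) "" = s := by
      rw [PySem.List.pyGetD_natCast, List.getD_eq_getElem full "" ha, h1]
    rw [PySem.List.pyRange_one_cons (by exact_mod_cast ha), List.foldl_cons]
    have hcast : (a : Int) + 1 = ((a + 1 : Nat) : Int) := by push_cast; ring
    rw [hget, hcast, ih full (a + 1) h2]
    simp [pvScanGo]

theorem pvAScan_eq_scanGo (l : List String) :
    pvAScan l = pvScanGo (l.map pvParse) 0 (0, 0) := by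
  have := pvAScan_aux l l 0 (by simp) (0, 0)
  simpa [pvAScan] using this

theorem pvScanGo_spec (c : List Int) : ∀ (i m r : Int),
    ((∀ x ∈ c, x ≤ m) ∧ pvScanGo c i (m, r) = (m, r)) ∨
    (∃ p : Nat, p < c.length ∧ m < c.getD p 0 ∧
      (∀ j, j < p → c.getD j 0 < c.getD p 0) ∧
      (∀ j, j < c.length → c.getD j 0 ≤ c.getD p 0) ∧
      pvScanGo c i (m, r) = (c.getD p 0, i + p)) := by
  induction c with
  | nil => intro i m r; exact Or.inl ⟨by simp, rfl⟩
  | cons a t ih =>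
    intro i m r
    by_cases hc : a > m
    · have hstep : pvScanGo (a :: t) i (m, r) = pvScanGo t (i + 1) (a, i) := by
        simp [pvScanGo, hc]
      rcases ih (i + 1) a i with ⟨hall, heq⟩ | ⟨p, hp, hlt, hstrict, hle, heq⟩
      · right
        refine ⟨0, by simp, by simpa using hc, ?_, ?_, ?_⟩
        · intro j hj; omega
        · intro j hj
          cases j with
          | zero => simp
          | succ j =>
            simp only [List.getD_cons_succ, List.getD_cons_zero]
            exact hall _ (pvGetD_mem t j (by simpa using hj))
        · rw [hstep, heq]
          simp
      · right
        refine ⟨p + 1, by simpa using hp, ?_, ?_, ?_, ?_⟩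
        · simp only [List.getD_cons_succ]
          exact lt_trans hc hlt
        · intro j hj
          cases j with
          | zero => simpa using hlt
          | succ j =>
            simp only [List.getD_cons_succ]
            exact hstrict j (by omega)
        · intro j hj
          cases j with
          | zero => simpa using le_of_lt hlt
          | succ j =>
            simp only [List.getD_cons_succ]
            exact hle j (by simpa using hj)
        · rw [hstep, heq]
          simp only [List.getD_cons_succ, Prod.mk.injEq, true_and]
          push_cast; ring
    · have hstep : pvScanGo (a :: t) i (m, r) = pvScanGo t (i + 1) (m, r) := by
        simp [pvScanGo, hc]
      rcases ih (i + 1) m r with ⟨hall, heq⟩ | ⟨p, hp, hlt, hstrict, hle, heq⟩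
      · left
        refine ⟨?_, by rw [hstep, heq]⟩
        intro x hx
        rcases List.mem_cons.mp hx with h | h
        · omega
        · exact hall _ h
      · right
        refine ⟨p + 1, by simpa using hp, by simpa using hlt, ?_, ?_, ?_⟩
        · intro j hj
          cases j with
          | zero =>
            simp only [List.getD_cons_succ, List.getD_cons_zero]
            exact lt_of_le_of_lt (by omega) hlt
          | succ j =>
            simp only [List.getD_cons_succ]
            exact hstrict j (by omega)
        · intro j hj
          cases j with
          | zero =>
            simp only [List.getD_cons_succ, List.getD_cons_zero]
            exact le_of_lt (lt_of_le_of_lt (by omega : a ≤ m) hlt)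
          | succ j =>
            simp only [List.getD_cons_succ]
            exact hle j (by simpa using hj)
        · rw [hstep, heq]
          simp only [List.getD_cons_succ, Prod.mk.injEq, true_and]
          push_cast; ring

theorem pvScan_first_argmax (c : List Int) (h0 : ∀ x ∈ c, 0 ≤ x) (hne : c ≠ []) :
    ∃ p : Nat, p < c.length ∧ (pvScanGo c 0 (0, 0)).2 = (p : Int) ∧
      (∀ j, j < p → c.getD j 0 < c.getD p 0) ∧
      (∀ j, j < c.length → c.getD j 0 ≤ c.getD p 0) := by
  rcases pvScanGo_spec c 0 0 0 with ⟨hall, heq⟩ | ⟨p, hp, _hlt, hstrict, hle, heq⟩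
  · have hlen : 0 < c.length := by
      cases c with
      | nil => exact absurd rfl hne
      | cons a t => simp
    refine ⟨0, hlen, by rw [heq]; simp, by intro j hj; omega, ?_⟩
    intro j hj
    have h1 : c.getD j 0 ≤ 0 := hall _ (pvGetD_mem c j hj)
    have h2 : 0 ≤ c.getD 0 0 := h0 _ (pvGetD_mem c 0 hlen)
    omega
  · refine ⟨p, hp, ?_, hstrict, hle⟩
    rw [heq]
    simp

-- ---- stability of PySem's sort over a strictly increasing index list ----
def pvRLex (key : Int → Int) (a b : Int) : Prop :=
  key a < key b ∨ (key a = key b ∧ a < b)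

theorem pvInsertBy_nil (bef : Int → Int → Bool) (x : Int) :
    PySem.List.insertBy bef x [] = [x] := rfl

theorem pvInsertBy_cons (bef : Int → Int → Bool) (x y : Int) (ys : List Int) :
    PySem.List.insertBy bef x (y :: ys)
      = if bef x y then x :: y :: ys else y :: PySem.List.insertBy bef x ys := rfl

theorem pvInsertBy_pairwise (key : Int → Int) (x : Int) (acc : List Int)
    (hpw : acc.Pairwise (pvRLex key)) (hlt : ∀ a ∈ acc, a < x) :
    (PySem.List.insertBy (fun a b => decide (key a < key b)) x acc).Pairwise (pvRLex key) := by
  induction acc with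
  | nil => simp [pvInsertBy_nil]
  | cons y t ih =>
    rw [pvInsertBy_cons]
    rcases List.pairwise_cons.mp hpw with ⟨hy, ht⟩
    by_cases hk : key x < key y
    · rw [if_pos (by simpa using hk)]
      refine List.pairwise_cons.mpr ⟨?_, hpw⟩
      intro z hz
      rcases List.mem_cons.mp hz with h | h
      · subst h; exact Or.inl hk
      · have := hy z h
        rcases this with h' | ⟨h', _⟩
        · exact Or.inl (lt_trans hk h')
        · exact Or.inl (by omega)
    · rw [if_neg (by simpa using hk)]
      refine List.pairwise_cons.mpr ⟨?_, ih ht (fun a ha => hlt a (List.mem_cons_of_mem _ ha))⟩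
      intro z hz
      rcases (PySem.List.mem_insertBy _ _ _ _).mp hz with rfl | h
      · have hyx : y < z := hlt y (List.mem_cons_self)
        rcases lt_or_eq_of_le (not_lt.mp hk) with h' | h'
        · exact Or.inl h'
        · exact Or.inr ⟨h', hyx⟩
      · exact hy z h

theorem pvSorted_pairwise (key : Int → Int) (rs : List Int) (hinc : rs.Pairwise (· < ·)) :
    (PySem.List.sorted rs key false).Pairwise (pvRLex key) := by
  rw [PySem.List.sorted_eq_foldl_insertBy]
  have main : ∀ (l acc : List Int), l.Pairwise (· < ·) → acc.Pairwise (pvRLex key) →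
      (∀ a ∈ acc, ∀ y ∈ l, a < y) →
      (l.foldl (fun acc x => PySem.List.insertBy (fun a b => decide (key a < key b)) x acc)
        acc).Pairwise (pvRLex key) := by
    intro l
    induction l with
    | nil => intro acc _ hacc _; simpa using hacc
    | cons x t ihl =>
      intro acc hinc hacc hcross
      rw [List.foldl_cons]
      rcases List.pairwise_cons.mp hinc with ⟨hx, ht⟩
      refine ihl _ ht ?_ ?_
      · exact pvInsertBy_pairwise key x acc hacc
          (fun a ha => hcross a ha x List.mem_cons_self)
      · intro a ha y hy
        rcases (PySem.List.mem_insertBy _ _ _ _).mp ha with h | h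
        · subst h; exact hx y hy
        · exact hcross a h y (List.mem_cons_of_mem _ hy)
  exact main rs [] hinc (by simp) (by simp)

-- first argmax goes to the head of the stable sort
theorem pvSorted_step (key : Int → Int) (pre suf : List Int) (r : Int)
    (hinc : (pre ++ r :: suf).Pairwise (· < ·))
    (hpre : ∀ x ∈ pre, key r < key x)
    (hall : ∀ x ∈ pre ++ r :: suf, key r ≤ key x) :
    PySem.List.sorted (pre ++ r :: suf) key false
      = r :: PySem.List.sorted (pre ++ suf) key false := by
  have hanti : ∀ a b : Int, pvRLex key a b → pvRLex key b a → a = b := by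
    intro a b h1 h2
    rcases h1 with h | ⟨h, h'⟩ <;> rcases h2 with g | ⟨g, g'⟩ <;> omega
  rcases List.pairwise_append.mp hinc with ⟨hpreinc, hconsinc, hcrossinc⟩
  rcases List.pairwise_cons.mp hconsinc with ⟨hrsuf, hsufinc⟩
  have hinc' : (pre ++ suf).Pairwise (· < ·) := by
    refine List.pairwise_append.mpr ⟨hpreinc, hsufinc, ?_⟩
    intro a ha b hb
    exact hcrossinc a ha b (List.mem_cons_of_mem _ hb)
  have hperm : (PySem.List.sorted (pre ++ r :: suf) key false).Perm
      (r :: PySem.List.sorted (pre ++ suf) key false) := by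
    refine (PySem.List.sorted_perm _ _ _).trans ?_
    refine (List.perm_middle).trans ?_
    exact List.Perm.cons r (PySem.List.sorted_perm _ _ _).symm
  have hs1 : (PySem.List.sorted (pre ++ r :: suf) key false).Pairwise (pvRLex key) :=
    pvSorted_pairwise key _ hinc
  have hs2 : (r :: PySem.List.sorted (pre ++ suf) key false).Pairwise (pvRLex key) := by
    refine List.pairwise_cons.mpr ⟨?_, pvSorted_pairwise key _ hinc'⟩
    intro z hz
    have hz' : z ∈ pre ++ suf := (PySem.List.mem_sorted _ _ _ _).mp hz
    rcases List.mem_append.mp hz' with h | h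
    · exact Or.inl (hpre z h)
    · have hle : key r ≤ key z := hall z (by
        refine List.mem_append.mpr (Or.inr ?_)
        exact List.mem_cons_of_mem _ h)
      rcases lt_or_eq_of_le hle with h' | h'
      · exact Or.inl h'
      · exact Or.inr ⟨h', hrsuf z h⟩
  exact List.Perm.eq_of_pairwise (fun a b _ _ h1 h2 => hanti a b h1 h2) hs1 hs2 hperm

-- ---- loop plumbing ----
theorem pvFoldl_const {α β : Type} (l : List α) (g : β → β) (init : β) :
    l.foldl (fun st _ => g st) init = g^[l.length] init := by
  induction l generalizing init with
  | nil => rfl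
  | cons x t ih =>
    simp only [List.foldl_cons, List.length_cons, ih, Function.iterate_succ_apply]

theorem pvTake_of_range (l : List Int) (m : Nat) (hm : m ≤ l.length) :
    (List.range m).map (fun t => l.getD t 0) = l.take m := by
  apply List.ext_getElem (by simp; omega)
  intro i h1 h2
  simp only [List.getElem_map, List.getElem_range, List.getElem_take]
  exact List.getD_eq_getElem l 0 (by simp at h1; omega)

-- ---- the main selection invariant ----
theorem pvMain (texto : String) (G : Int → String) :
    ∀ (m : Nat) (rs : List Int) (acc : List String),
      rs.Pairwise (· < ·) → m ≤ rs.length →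
      (pvAStep^[m]
        (rs.map (fun i => pvStrOfCount (PySem.Str.count texto (G i))), rs.map G, acc)).2.2
        = acc ++ ((PySem.List.sorted rs
            (fun i => -((PySem.Str.count texto (G i) : Int))) false).take m).map G := by
  intro m
  induction m with
  | zero => intro rs acc _ _; simp
  | succ m ih =>
    intro rs acc hinc hm
    have hrs_ne : rs ≠ [] := by intro h; rw [h] at hm; simp at hm
    have hc_len : (rs.map (fun i => ((PySem.Str.count texto (G i) : Int)))).length = rs.length :=
      List.length_map _
    have h0 : ∀ x ∈ rs.map (fun i => ((PySem.Str.count texto (G i) : Int))), 0 ≤ x := by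
      intro x hx
      rcases List.mem_map.mp hx with ⟨i, _, rfl⟩
      exact Int.natCast_nonneg _
    have hc_ne : rs.map (fun i => ((PySem.Str.count texto (G i) : Int))) ≠ [] := by
      simpa using hrs_ne
    obtain ⟨p, hp0, hsnd, hstrict, hle⟩ := pvScan_first_argmax _ h0 hc_ne
    have hp : p < rs.length := by rw [hc_len] at hp0; exact hp0
    have hcget : ∀ j, j < rs.length →
        (rs.map (fun i => ((PySem.Str.count texto (G i) : Int)))).getD j 0
          = ((PySem.Str.count texto (G (rs.getD j 0)) : Int)) := by
      intro j hj
      rw [List.getD_eq_getElem _ _ (by rw [hc_len]; exact hj), List.getElem_map,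
        List.getD_eq_getElem _ _ hj]
    have hdec : rs = rs.take p ++ rs.getD p 0 :: rs.drop (p + 1) := by
      conv_lhs => rw [← List.take_append_drop p rs]
      rw [List.drop_eq_getElem_cons hp, List.getD_eq_getElem _ _ hp]
    -- transfer the argmax facts to elements
    have hpre_lt : ∀ x ∈ rs.take p,
        ((PySem.Str.count texto (G x) : Int)) < ((PySem.Str.count texto (G (rs.getD p 0)) : Int)) := by
      intro x hx
      obtain ⟨j, hjlen, hget⟩ := List.mem_iff_getElem.mp hx
      have hjp : j < p := by
        have := hjlen
        rw [List.length_take] at this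
        omega
      have hgx : rs.getD j 0 = x := by
        rw [List.getD_eq_getElem _ _ (by omega), ← hget, List.getElem_take]
      have := hstrict j hjp
      rw [hcget j (by omega), hcget p hp, hgx] at this
      exact this
    have hall_le : ∀ x ∈ rs,
        ((PySem.Str.count texto (G x) : Int)) ≤ ((PySem.Str.count texto (G (rs.getD p 0)) : Int)) := by
      intro x hx
      obtain ⟨j, hjlen, hget⟩ := List.mem_iff_getElem.mp hx
      have hgx : rs.getD j 0 = x := by rw [List.getD_eq_getElem _ _ hjlen, hget]
      have := hle j (by rw [hc_len]; exact hjlen)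
      rw [hcget j hjlen, hcget p hp, hgx] at this
      exact this
    -- compute one step of the loop
    have hscan : (pvAScan (rs.map (fun i => pvStrOfCount (PySem.Str.count texto (G i))))).2 = (p : Int) := by
      rw [pvAScan_eq_scanGo, List.map_map]
      have hmap : (rs.map (pvParse ∘ fun i => pvStrOfCount (PySem.Str.count texto (G i))))
          = rs.map (fun i => ((PySem.Str.count texto (G i) : Int))) := by
        apply List.map_congr_left
        intro i _
        exact pvParse_pvStrOfCount _
      rw [hmap, hsnd]
    have hq : PySem.List.pyGetD (rs.map G) ((p : Int)) "" = G (rs.getD p 0) := by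
      rw [PySem.List.pyGetD_natCast, List.getD_eq_getElem _ _ (by simpa using hp),
        List.getElem_map, List.getD_eq_getElem _ _ hp]
    have hqF : PySem.List.pyGetD (rs.map (fun i => pvStrOfCount (PySem.Str.count texto (G i)))) ((p : Int)) ""
        = pvStrOfCount (PySem.Str.count texto (G (rs.getD p 0))) := by
      rw [PySem.List.pyGetD_natCast, List.getD_eq_getElem _ _ (by simpa using hp),
        List.getElem_map, List.getD_eq_getElem _ _ hp]
    have hremF : (PySem.List.remove? (rs.map (fun i => pvStrOfCount (PySem.Str.count texto (G i))))
        (pvStrOfCount (PySem.Str.count texto (G (rs.getD p 0))))).getD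
          (rs.map (fun i => pvStrOfCount (PySem.Str.count texto (G i))))
        = (rs.take p ++ rs.drop (p + 1)).map (fun i => pvStrOfCount (PySem.Str.count texto (G i))) := by
      have hmem : pvStrOfCount (PySem.Str.count texto (G (rs.getD p 0)))
          ∈ rs.map (fun i => pvStrOfCount (PySem.Str.count texto (G i))) := by
        refine List.mem_map.mpr ⟨rs.getD p 0, ?_, rfl⟩
        exact pvGetD_mem rs p hp
      rw [PySem.List.remove?_eq_some_erase _ _ hmem, Option.getD_some]
      have hmapdecF : rs.map (fun i => pvStrOfCount (PySem.Str.count texto (G i)))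
          = (rs.take p).map (fun i => pvStrOfCount (PySem.Str.count texto (G i)))
            ++ pvStrOfCount (PySem.Str.count texto (G (rs.getD p 0)))
              :: (rs.drop (p + 1)).map (fun i => pvStrOfCount (PySem.Str.count texto (G i))) := by
        conv_lhs => rw [hdec]
        rw [List.map_append, List.map_cons]
      rw [hmapdecF, List.erase_append_right _ ?notin, List.erase_cons_head, ← List.map_append]
      case notin =>
        intro hmem'
        rcases List.mem_map.mp hmem' with ⟨x, hx, hfx⟩
        have hcc : PySem.Str.count texto (G x) = PySem.Str.count texto (G (rs.getD p 0)) :=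
          pvStrOfCount_inj hfx
        have h1 := hpre_lt x hx
        rw [hcc] at h1
        exact lt_irrefl _ h1
    have hremG : (PySem.List.remove? (rs.map G) (G (rs.getD p 0))).getD (rs.map G)
        = (rs.take p ++ rs.drop (p + 1)).map G := by
      have hmem : G (rs.getD p 0) ∈ rs.map G :=
        List.mem_map.mpr ⟨rs.getD p 0, pvGetD_mem rs p hp, rfl⟩
      rw [PySem.List.remove?_eq_some_erase _ _ hmem, Option.getD_some]
      have hmapdecG : rs.map G
          = (rs.take p).map G ++ G (rs.getD p 0) :: (rs.drop (p + 1)).map G := by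
        conv_lhs => rw [hdec]
        rw [List.map_append, List.map_cons]
      rw [hmapdecG, List.erase_append_right _ ?notin, List.erase_cons_head, ← List.map_append]
      case notin =>
        intro hmem'
        rcases List.mem_map.mp hmem' with ⟨x, hx, hfx⟩
        have h1 := hpre_lt x hx
        rw [hfx] at h1
        exact lt_irrefl _ h1
    -- one loop iteration
    have hstep : pvAStep (rs.map (fun i => pvStrOfCount (PySem.Str.count texto (G i))), rs.map G, acc)
        = ((rs.take p ++ rs.drop (p + 1)).map (fun i => pvStrOfCount (PySem.Str.count texto (G i))),
           (rs.take p ++ rs.drop (p + 1)).map G,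
           acc ++ [G (rs.getD p 0)]) := by
      simp only [pvAStep, hscan, hq, hqF, hremF, hremG]
    -- pairwise and length facts for the remaining indices
    have hinc2 : (rs.take p ++ rs.getD p 0 :: rs.drop (p + 1)).Pairwise (· < ·) := hdec ▸ hinc
    rcases List.pairwise_append.mp hinc2 with ⟨hpreinc, hconsinc, hcrossinc⟩
    rcases List.pairwise_cons.mp hconsinc with ⟨hrsuf, hsufinc⟩
    have hinc' : (rs.take p ++ rs.drop (p + 1)).Pairwise (· < ·) := by
      refine List.pairwise_append.mpr ⟨hpreinc, hsufinc, ?_⟩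
      intro a ha b hb
      exact hcrossinc a ha b (List.mem_cons_of_mem _ hb)
    have hlen' : (rs.take p ++ rs.drop (p + 1)).length = rs.length - 1 := by
      have := congrArg List.length hdec
      simp only [List.length_append, List.length_cons] at this ⊢
      omega
    have hm' : m ≤ (rs.take p ++ rs.drop (p + 1)).length := by omega
    -- sorted step
    have hsortstep : PySem.List.sorted rs (fun i => -((PySem.Str.count texto (G i) : Int))) false
        = rs.getD p 0 :: PySem.List.sorted (rs.take p ++ rs.drop (p + 1))
            (fun i => -((PySem.Str.count texto (G i) : Int))) false := by
      conv_lhs => rw [hdec]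
      refine pvSorted_step _ _ _ _ hinc2 ?_ ?_
      · intro x hx
        have h1 := hpre_lt x hx
        show -((PySem.Str.count texto (G (rs.getD p 0)) : Int)) < -((PySem.Str.count texto (G x) : Int))
        omega
      · intro x hx
        have h1 := hall_le x (hdec ▸ hx)
        show -((PySem.Str.count texto (G (rs.getD p 0)) : Int)) ≤ -((PySem.Str.count texto (G x) : Int))
        omega
    rw [Function.iterate_succ_apply, hstep, ih _ _ hinc' hm', hsortstep,
      List.take_succ_cons, List.map_cons, List.append_cons, List.append_assoc]
    simp

-- ===== VERDICT (by name: the statement is the Claim_ definition above) =====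
theorem calcula_top_ocorrencias_de_queries_spec : Claim_equal_calcula_top_ocorrencias_de_queries := by
  intro texto queries k _hDom hPre
  have hPre' : k ≤ (queries.length : Int) := hPre
  have hm : k.toNat ≤ queries.length := by omega
  show calcula_top_ocorrencias_de_queries texto queries k
      = calcula_top_ocorrencias_de_queries_alt texto queries k
  simp only [calcula_top_ocorrencias_de_queries, calcula_top_ocorrencias_de_queries_alt]
  rw [PySem.List.foldl_prod_mk
      (f := fun acc x => acc ++ [pvStrOfCount (PySem.Str.count texto x)])
      (g := fun acc x => acc ++ [x]),
    PySem.List.foldl_append_singleton_eq_map, PySem.List.foldl_append_singleton_eq_self,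
    List.nil_append, List.nil_append]
  rw [pvFoldl_const (PySem.List.pyRange 0 k 1) pvAStep, PySem.List.length_pyRange_one]
  have hG : (PySem.List.pyRange 0 (queries.length : Int) 1).map
      (fun j => PySem.List.pyGetD queries j "") = queries :=
    PySem.List.map_pyGetD_pyRange_zero' queries ""
  -- the A-side initial lists as maps over the index range
  have hFmap : queries.map (fun x => pvStrOfCount (PySem.Str.count texto x))
      = (PySem.List.pyRange 0 (queries.length : Int) 1).map
          (fun i => pvStrOfCount (PySem.Str.count texto (PySem.List.pyGetD queries i ""))) := by
    conv_lhs => rw [← hG]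
    rw [List.map_map]
    rfl
  have main := pvMain texto (fun i => PySem.List.pyGetD queries i "") k.toNat
    (PySem.List.pyRange 0 (queries.length : Int) 1) []
    (PySem.List.pairwise_lt_pyRange_one 0 ((queries.length : Int)))
    (by rw [PySem.List.length_pyRange_one]; omega)
  simp only [List.nil_append] at main
  have hsub : ((k : Int) - 0).toNat = k.toNat := by omega
  rw [hsub]
  dsimp only
  rw [← hFmap, hG] at main
  rw [main]
  -- the B side: indexing the ranked list over range(k) is take k.toNat
  have hlenranked : (PySem.List.sorted (PySem.List.pyRange 0 (queries.length : Int) 1)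
      (fun i => -((PySem.Str.count texto (PySem.List.pyGetD queries i "") : Int))) false).length
      = queries.length := by
    rw [PySem.List.length_sorted, PySem.List.length_pyRange_one]
    omega
  rw [PySem.List.pyRange_one 0 k, hsub, List.map_map]
  rw [← pvTake_of_range _ k.toNat (by omega), List.map_map]
  apply List.map_congr_left
  intro t _
  simp [PySem.List.pyGetD_natCast]
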